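-- pv_equiv track=rewrite | github.com/dplv/Advent-of-Code | 2023/day 13/day13.py | solution
-- ===== SOURCE A (Python) =====
-- def transpose_pattern(pattern: list) -> list:
--     transposed = list()
--     for y in range(len(pattern[0])):
--         transposed_row = list()
--         for x in range(len(pattern)):
--             transposed_row.append(pattern[x][y])
--         transposed.append(''.join(transposed_row))
--     return transposed
--
-- def get_reflection_row(pattern: list, part:int = 1) -> int:
--     for r in range(1, len(pattern)):
--         rows_in_reflection = min(r, len(pattern) - r)
--         above = slice(r - rows_in_reflection, r)
--         below = slice(r, r + rows_in_reflection)
--         str_above = ''.join(pattern[above])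
--         str_below = ''.join(pattern[below][::-1])
--         if part ==1 and pattern[above] == pattern[below][::-1]:
--             return r
--         if part == 2 and len([str_above[i] for i in range(len(str_above)) if str_above[i] != str_below[i]]) == 1:
--             return r
--     return -1
--
-- def solution(patterns: list, part: int) -> int:
--     summary = 0
--     for i, pattern in enumerate(patterns):
--         r = get_reflection_row(transpose_pattern(pattern), part)
--         if r > 0:
--             summary += r
--         else:
--             r = get_reflection_row(pattern, part)
--             summary += r * 100
--     return summary
-- ===== SOURCE B (Python) =====
-- def hamming(s, t):
--     d = abs(len(s) - len(t))
--     for a, b in zip(s, t):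
--         if a != b:
--             d += 1
--     return d
--
-- def find_reflection(pattern, defects):
--     # A fold line between rows r-1 and r mirrors exactly the row pairs (i, j)
--     # with i < j and i + j == 2*r - 1 (both indices in range), so one table of
--     # anti-diagonal Hamming-distance sums answers every candidate line at once.
--     n = len(pattern)
--     diag = [0] * (2 * n)
--     for j in range(n):
--         for i in range(j):
--             diag[i + j] += hamming(pattern[i], pattern[j])
--     for r in range(1, n):
--         if diag[2 * r - 1] == defects:
--             return r
--     return -1
--
-- def solution(patterns, part):
--     defects = part - 1 if part in (1, 2) else None
--     total = 0
--     for pattern in patterns: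
--         cols = [''.join(row[y] for row in pattern) for y in range(len(pattern[0]))]
--         r = find_reflection(cols, defects)
--         total += r if r > 0 else 100 * find_reflection(pattern, defects)
--     return total
-- ===== Notes on version B (the rewrite author's own statement) =====
-- stated objective: alternative
-- what changed: Instead of testing each candidate fold line with its own comparison pass, B precomputes one table of anti-diagonal Hamming-distance sums over all row pairs (the mirrored pairs of fold r are exactly the pairs i<j with i+j = 2r-1), so the candidate scan is a single table lookup per line with no inner loop.
-- outside the precondition, e.g. on solution([['a', 'ab']], 2): A returns -100, B returns 100
import Mathlib
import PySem

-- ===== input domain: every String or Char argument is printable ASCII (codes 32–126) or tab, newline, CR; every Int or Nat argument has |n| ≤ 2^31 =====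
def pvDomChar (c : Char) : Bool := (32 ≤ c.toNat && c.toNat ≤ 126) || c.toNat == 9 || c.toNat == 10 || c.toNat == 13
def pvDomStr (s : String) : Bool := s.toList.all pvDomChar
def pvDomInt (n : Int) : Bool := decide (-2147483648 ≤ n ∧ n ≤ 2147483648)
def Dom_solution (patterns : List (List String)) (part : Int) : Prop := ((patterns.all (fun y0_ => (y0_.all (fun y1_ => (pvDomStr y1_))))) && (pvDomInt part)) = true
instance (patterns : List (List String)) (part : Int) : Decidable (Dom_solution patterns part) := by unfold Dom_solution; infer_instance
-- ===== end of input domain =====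

-- B replaces A's per-candidate comparison passes by one precomputed table of anti-diagonal
-- Hamming-distance sums over all row pairs (the mirrored pairs of fold r are exactly the pairs
-- i<j with i+j = 2r-1), so the candidate scan is a table lookup; transpose via zip(*pattern).

-- ===== PORT A =====
-- transpose_pattern: y over range(len(pattern[0])), each column joined into a string.
-- pattern[x][y] is ported with getD; inside Pre_ every index is in range, so the default is never used.
def transpose_pattern (pattern : List String) : List String :=
  (List.range (pattern.headD "").toList.length).map
    (fun y => String.ofList (pattern.map (fun row => row.toList.getD y ' ')))

-- get_reflection_row's loop; slices with 0 ≤ a ≤ b ≤ n are exactly drop/take, [::-1] is reverse,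
-- ''.join is flatten on the char-list side; str_below[i] is getD (in range whenever Python returns).
def grr_loop (pattern : List String) (part : Int) : List Nat → Int
  | [] => -1
  | r :: rs =>
    let n := pattern.length
    let m := min r (n - r)
    let above := (pattern.drop (r - m)).take m
    let belowRev := ((pattern.drop r).take m).reverse
    let sa := (above.map String.toList).flatten
    let sb := (belowRev.map String.toList).flatten
    if part = 1 ∧ above = belowRev then (r : Int)
    else if part = 2 ∧
        ((List.range sa.length).filter (fun i => sa.getD i ' ' ≠ sb.getD i ' ')).length = 1 then
      (r : Int)
    else grr_loop pattern part rs

def get_reflection_row (pattern : List String) (part : Int) : Int :=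
  grr_loop pattern part (List.range' 1 (pattern.length - 1))

def solution (patterns : List (List String)) (part : Int) : Int :=
  patterns.foldl (fun summary pattern =>
    let r := get_reflection_row (transpose_pattern pattern) part
    if r > 0 then summary + r
    else summary + (get_reflection_row pattern part) * 100) 0

-- ===== PORT B =====
-- hamming: length overhang plus a loop over the zipped character pairs.
def hamming (s t : String) : Int :=
  (s.toList.zip t.toList).foldl (fun d p => if p.1 ≠ p.2 then d + 1 else d)
    (((s.toList.length : Int) - (t.toList.length : Int)).natAbs : Int)

-- diag = [0]*(2n); for j in range(n): for i in range(j): diag[i+j] += hamming(...)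
def build_diag (q : List String) : List Int :=
  (List.range q.length).foldl (fun diag j =>
    (List.range j).foldl (fun diag i =>
      diag.set (i + j) (diag.getD (i + j) 0 + hamming (q.getD i "") (q.getD j ""))) diag)
    (List.replicate (2 * q.length) 0)

-- the candidate scan: a single table lookup per fold line
def fr_scan (diag : List Int) (defects : Option Int) : List Nat → Int
  | [] => -1
  | r :: rs =>
    if some (diag.getD (2 * r - 1) 0) = defects then (r : Int) else fr_scan diag defects rs

def find_reflection (pattern : List String) (defects : Option Int) : Int :=
  fr_scan (build_diag pattern) defects (List.range' 1 (pattern.length - 1))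

-- cols comprehension: column y joined over the rows, y over range(len(pattern[0]));
-- row[y] ported with getD (in range on every input where the Python returns).
def zip_cols (pattern : List String) : List String :=
  (List.range (pattern.headD "").toList.length).map
    (fun y => String.ofList (pattern.map (fun row => row.toList.getD y ' ')))

def solution_alt (patterns : List (List String)) (part : Int) : Int :=
  let defects : Option Int := if part = 1 ∨ part = 2 then some (part - 1) else none
  patterns.foldl (fun total pattern =>
    let r := find_reflection (zip_cols pattern) defects
    total + (if r > 0 then r else 100 * find_reflection pattern defects)) 0

-- ===== PRECONDITION & SPEC =====
-- Pre_ excludes patterns that are empty or have a row shorter than their first row — A raises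
-- IndexError there — and, for part 2 only, non-rectangular patterns with at least two rows, on
-- which A's positional comparison of the two misaligned joined strings may raise or is an
-- accident of its join-based implementation; these shapes are outside the rectangular-grid domain.
def Pre_solution (patterns : List (List String)) (part : Int) : Prop :=
  ∀ p ∈ patterns, p ≠ [] ∧ (∀ row ∈ p, (p.headD "").toList.length ≤ row.toList.length)
    ∧ (part = 2 → 2 ≤ p.length → ∀ row ∈ p, row.toList.length = (p.headD "").toList.length)

instance (patterns : List (List String)) (part : Int) : Decidable (Pre_solution patterns part) := by
  unfold Pre_solution; infer_instance

def pvWitness_solution : List (List String) × Int := ([["##", ".."], ["#", "#"]], 1)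

def Spec_solution (patterns : List (List String)) (part : Int) (out : Int) : Prop := out = solution_alt patterns part
instance (patterns : List (List String)) (part : Int) (out : Int) : Decidable (Spec_solution patterns part out) := by unfold Spec_solution; infer_instance

-- ===== CLAIM (what is proved, stated in full; the proofs are below) =====
def Claim_equal_solution : Prop := ∀ (patterns : List (List String)) (part : Int), Dom_solution patterns part → Pre_solution patterns part → Spec_solution patterns part (solution patterns part)

-- ===== LEMMAS AND PROOFS =====

-- character-mismatch count of two char lists (the common measure both programs compute)
def cm (a b : List Char) : Nat := ((a.zip b).filter (fun p => p.1 ≠ p.2)).length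

theorem cm_cons (x y : Char) (a b : List Char) :
    cm (x :: a) (y :: b) = (if x = y then 0 else 1) + cm a b := by
  by_cases h : x = y <;> simp [cm, h, Nat.add_comm]

theorem cm_eq_zero_iff : ∀ {a b : List Char}, a.length = b.length → (cm a b = 0 ↔ a = b)
  | [], [], _ => by simp [cm]
  | x :: a, y :: b, h => by
    have h' : a.length = b.length := by simpa using h
    by_cases hxy : x = y <;> simp [cm_cons, hxy, cm_eq_zero_iff h']

theorem cm_append {a b : List Char} (c d : List Char) (h : a.length = b.length) :
    cm (a ++ c) (b ++ d) = cm a b + cm c d := by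
  simp [cm, List.zip_append h, List.filter_append]

def cmFull (a b : List Char) : Nat := cm a b + (a.length - b.length) + (b.length - a.length)

theorem cmFull_eq_zero_iff {a b : List Char} : cmFull a b = 0 ↔ a = b := by
  constructor
  · intro h
    have hlen : a.length = b.length := by unfold cmFull at h; omega
    have hcm : cm a b = 0 := by unfold cmFull at h; omega
    exact (cm_eq_zero_iff hlen).mp hcm
  · rintro rfl
    have h0 : cm a a = 0 := (cm_eq_zero_iff rfl).mpr rfl
    unfold cmFull
    omega

-- A's part-2 positional comparison over range(len) equals cm when the lengths agree
theorem range_count_eq_cm : ∀ {a b : List Char}, a.length = b.length →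
    ((List.range a.length).filter (fun i => a.getD i ' ' ≠ b.getD i ' ')).length = cm a b
  | [], [], _ => by simp [cm]
  | x :: a, y :: b, h => by
    have h' : a.length = b.length := by simpa using h
    have ih := range_count_eq_cm h'
    have hcomp : List.filter ((fun i => decide ((x :: a).getD i ' ' ≠ (y :: b).getD i ' '))
          ∘ (· + 1)) (List.range a.length)
        = List.filter (fun i => decide (a.getD i ' ' ≠ b.getD i ' ')) (List.range a.length) := by
      apply List.filter_congr
      intro i _
      simp
    show ((List.range (a.length + 1)).filter _).length = _
    rw [List.range_succ_eq_map, List.filter_cons, List.filter_map, hcomp, cm_cons]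
    by_cases hxy : x = y
    · rw [if_neg (by simp [hxy]), List.length_map, ih, if_pos hxy, Nat.zero_add]
    · rw [if_pos (by simp [hxy]), if_neg hxy, List.length_cons, List.length_map, ih]
      omega

theorem sum_map_eq_zero_iff {α : Type} (l : List α) (f : α → Nat) :
    (l.map f).sum = 0 ↔ ∀ x ∈ l, f x = 0 := by
  induction l with
  | nil => simp
  | cons a l ih => simp [ih]

theorem flatten_len_eq (m : Nat) (f g : Nat → List Char)
    (h : ∀ j < m, (f j).length = (g j).length) :
    ((List.range m).map f).flatten.length = ((List.range m).map g).flatten.length := by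
  rw [List.length_flatten, List.length_flatten, List.map_map, List.map_map]
  apply congrArg
  apply List.map_congr_left
  intro j hj
  simp only [List.mem_range] at hj
  simp [h j hj]

-- mismatch count of flattened columns = sum of per-row mismatch counts
theorem flatten_cm_range : ∀ (m : Nat) (f g : Nat → List Char),
    (∀ j < m, (f j).length = (g j).length) →
    cm ((List.range m).map f).flatten ((List.range m).map g).flatten
      = ((List.range m).map (fun j => cm (f j) (g j))).sum := by
  intro m
  induction m with
  | zero => intro f g _; simp [cm]
  | succ m ih =>
    intro f g h
    rw [List.range_succ]
    simp only [List.map_append, List.map_cons, List.map_nil, List.flatten_append,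
      List.flatten_cons, List.flatten_nil, List.append_nil, List.sum_append,
      List.sum_cons, List.sum_nil]
    rw [cm_append _ _ (flatten_len_eq m f g (fun j hj => h j (by omega))),
      ih f g (fun j hj => h j (by omega))]
    omega

theorem sum_map_range_reflect (t : Nat → Nat) : ∀ m : Nat,
    ((List.range m).map (fun j => t (m - 1 - j))).sum = ((List.range m).map t).sum
  | 0 => rfl
  | m + 1 => by
    rw [List.sum_range_succ' (fun j => t (m + 1 - 1 - j)), List.sum_range_succ]
    have h1 : ((List.range m).map fun i => t (m + 1 - 1 - (i + 1))).sum
        = ((List.range m).map fun j => t (m - 1 - j)).sum := by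
      apply congrArg
      apply List.map_congr_left
      intro j _
      congr 1
      omega
    have h0 : m + 1 - 1 - 0 = m := by omega
    rw [h1, h0, sum_map_range_reflect t m]
    omega

theorem drop_take_eq_map_range (q : List String) (a m : Nat) (h : a + m ≤ q.length) :
    (q.drop a).take m = (List.range m).map (fun j => q.getD (a + j) "") := by
  apply List.ext_getElem
  · simp; omega
  · intro j h1 h2
    simp only [List.getElem_take, List.getElem_drop, List.getElem_map, List.getElem_range]
    rw [List.getD_eq_getElem q "" (by simp at h1 ⊢; omega)]

theorem drop_take_rev_eq_map_range (q : List String) (a m : Nat) (h : a + m ≤ q.length) :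
    ((q.drop a).take m).reverse = (List.range m).map (fun j => q.getD (a + (m - 1 - j)) "") := by
  rw [drop_take_eq_map_range q a m h]
  apply List.ext_getElem
  · simp
  · intro j h1 h2
    simp only [List.getElem_reverse, List.getElem_map, List.getElem_range, List.length_map,
      List.length_range]

-- the common per-fold mismatch total
def pairSum (q : List String) (r m : Nat) : Nat :=
  ((List.range m).map
    (fun k => cmFull (q.getD (r - 1 - k) "").toList (q.getD (r + k) "").toList)).sum

theorem len_getD {q : List String} {L : Nat} (hL : ∀ row ∈ q, row.toList.length = L)
    {i : Nat} (h : i < q.length) : (q.getD i "").toList.length = L := by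
  rw [List.getD_eq_getElem q "" h]
  exact hL _ (q.getElem_mem h)

theorem pairSum_reindex (q : List String) (r m : Nat) (hm : m ≤ r) :
    ((List.range m).map
      (fun j => cmFull (q.getD (r - m + j) "").toList (q.getD (r + (m - 1 - j)) "").toList)).sum
    = pairSum q r m := by
  unfold pairSum
  rw [← sum_map_range_reflect
    (fun k => cmFull (q.getD (r - 1 - k) "").toList (q.getD (r + k) "").toList) m]
  apply congrArg
  apply List.map_congr_left
  intro j hj
  simp only [List.mem_range] at hj
  have h1 : r - 1 - (m - 1 - j) = r - m + j := by omega
  rw [h1]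

-- B's hamming equals the total mismatch measure cmFull
theorem foldl_count_filter (l : List (Char × Char)) : ∀ i : Int,
    l.foldl (fun d p => if p.1 ≠ p.2 then d + 1 else d) i
      = i + ((l.filter (fun p => p.1 ≠ p.2)).length : Nat) := by
  induction l with
  | nil => intro i; simp
  | cons a l ih =>
    intro i
    by_cases h : a.1 = a.2
    · simp only [List.foldl_cons, List.filter_cons]
      rw [if_neg (by simp [h]), if_neg (by simp [h])]
      exact ih i
    · simp only [List.foldl_cons, List.filter_cons]
      rw [if_pos (by simp [h]), if_pos (by simp [h]), ih (i + 1), List.length_cons]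
      push_cast
      ring

theorem hamming_eq (s t : String) : hamming s t = (cmFull s.toList t.toList : Int) := by
  unfold hamming cmFull cm
  rw [foldl_count_filter]
  have : ((((s.toList.length : Int) - (t.toList.length : Int)).natAbs : Nat) : Int)
      = ((s.toList.length - t.toList.length : Nat) : Int) + ((t.toList.length - s.toList.length : Nat) : Int) := by
    omega
  rw [this]
  push_cast
  ring

-- getD through a single in-bounds set
theorem getD_set_eq (l : List Int) (k : Nat) (v : Int) (d : Nat) (hk : k < l.length) :
    (l.set k v).getD d 0 = if k = d then v else l.getD d 0 := by
  by_cases h : k = d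
  · subst h
    rw [if_pos rfl, List.getD_eq_getElem _ 0 (by simpa using hk), List.getElem_set_self]
  · rw [if_neg h]
    by_cases hd : d < l.length
    · rw [List.getD_eq_getElem _ 0 (by simpa using hd), List.getD_eq_getElem _ 0 hd,
        List.getElem_set_ne h]
    · rw [List.getD_eq_default _ 0 (by simpa using hd), List.getD_eq_default _ 0 (by omega)]

-- a fold of index-updates, read back at one position: only the hits at that index count
theorem getD_foldl_set (idx : Nat → Nat) (v : Nat → Int) :
    ∀ (is : List Nat) (l : List Int) (d : Nat), (∀ i ∈ is, idx i < l.length) →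
    ((is.foldl (fun l i => l.set (idx i) (l.getD (idx i) 0 + v i)) l).getD d 0)
      = l.getD d 0 + ((is.filter (fun i => idx i = d)).map v).sum := by
  intro is
  induction is with
  | nil => intro l d _; simp
  | cons i is ih =>
    intro l d hb
    have hi : idx i < l.length := hb i (by simp)
    simp only [List.foldl_cons, List.filter_cons]
    rw [ih _ d (fun x hx => by rw [List.length_set]; exact hb x (by simp [hx])),
      getD_set_eq l (idx i) _ d hi]
    by_cases h : idx i = d
    · rw [if_pos h, if_pos (by simp [h])]
      simp only [List.map_cons, List.sum_cons]
      rw [h]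
      ring
    · rw [if_neg h, if_neg (by simp [h])]

theorem length_foldl_set (idx : Nat → Nat) (v : Nat → Int) :
    ∀ (is : List Nat) (l : List Int),
    (is.foldl (fun l i => l.set (idx i) (l.getD (idx i) 0 + v i)) l).length = l.length := by
  intro is
  induction is with
  | nil => intro l; rfl
  | cons i is ih => intro l; rw [List.foldl_cons, ih, List.length_set]

-- filter of range by "i + j = d" is at most the single index d - j
theorem filter_range_hit (j d : Nat) : ∀ m : Nat,
    (List.range m).filter (fun i => i + j = d)
      = if j ≤ d ∧ d - j < m then [d - j] else [] := by
  intro m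
  induction m with
  | zero => rw [List.range_zero, List.filter_nil, if_neg (by omega)]
  | succ m ih =>
    rw [List.range_succ, List.filter_append, ih]
    by_cases h : m + j = d
    · rw [if_neg (by omega), if_pos (by omega)]
      simp only [List.filter_cons, List.filter_nil]
      rw [if_pos (by simpa using h), List.nil_append]
      have hm : d - j = m := by omega
      rw [hm]
    · have hfil : (if decide (m + j = d) = true then [m] else ([] : List Nat)) = [] := by
        simp [h]
      simp only [List.filter_cons, List.filter_nil]
      rw [hfil, List.append_nil]
      by_cases h1 : j ≤ d ∧ d - j < m
      · rw [if_pos h1, if_pos (by omega)]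
      · rw [if_neg h1, if_neg (by omega)]

-- the outer fold of build_diag, read back at index d
theorem diag_getD (H : Nat → Nat → Int) :
    ∀ (js : List Nat) (l : List Int) (d : Nat), (∀ j ∈ js, 2 * j ≤ l.length) →
    ((js.foldl (fun diag j =>
        (List.range j).foldl (fun diag i =>
          diag.set (i + j) (diag.getD (i + j) 0 + H i j)) diag) l).getD d 0)
      = l.getD d 0 + (js.map (fun j => if j ≤ d ∧ d - j < j then H (d - j) j else 0)).sum := by
  intro js
  induction js with
  | nil => intro l d _; simp
  | cons j js ih =>
    intro l d hb
    have hj : 2 * j ≤ l.length := hb j (by simp)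
    simp only [List.foldl_cons, List.map_cons, List.sum_cons]
    rw [ih _ d (fun x hx => by
        rw [length_foldl_set (· + j) (fun i => H i j)]; exact hb x (by simp [hx])),
      getD_foldl_set (· + j) (fun i => H i j) (List.range j) l d
        (fun i hi => by simp only [List.mem_range] at hi; show i + j < l.length; omega),
      filter_range_hit j d j]
    by_cases h : j ≤ d ∧ d - j < j
    · rw [if_pos h, if_pos h]
      simp only [List.map_cons, List.map_nil, List.sum_cons, List.sum_nil]
      ring
    · rw [if_neg h, if_neg h]
      simp

-- summing the diagonal hits over j < n gives exactly the mirrored pairs of fold r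
theorem outer_sum_eq (H : Nat → Nat → Int) (r : Nat) (hr : 1 ≤ r) : ∀ n : Nat,
    ((List.range n).map
      (fun j => if j ≤ 2 * r - 1 ∧ (2 * r - 1) - j < j then H ((2 * r - 1) - j) j else 0)).sum
    = ((List.range (min r (n - r))).map (fun k => H (r - 1 - k) (r + k))).sum := by
  intro n
  induction n with
  | zero => simp
  | succ n ih =>
    rw [List.sum_range_succ]
    by_cases h : r ≤ n ∧ n ≤ 2 * r - 1
    · have hm : min r (n + 1 - r) = min r (n - r) + 1 := by omega
      rw [if_pos (by omega), hm, List.sum_range_succ, ih]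
      have hk : min r (n - r) = n - r := by omega
      have e1 : r - 1 - min r (n - r) = 2 * r - 1 - n := by omega
      have e2 : r + min r (n - r) = n := by omega
      rw [hk] at e1 e2 ⊢
      rw [e1, e2]
    · have hm : min r (n + 1 - r) = min r (n - r) := by omega
      rw [if_neg (by omega), hm, ih, add_zero]

theorem sum_hamming_cast (q : List String) (r : Nat) : ∀ m : Nat,
    ((List.range m).map (fun k => hamming (q.getD (r - 1 - k) "") (q.getD (r + k) ""))).sum
      = (pairSum q r m : Int) := by
  intro m
  induction m with
  | zero => simp [pairSum]
  | succ m ih =>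
    unfold pairSum at ih ⊢
    rw [List.sum_range_succ, List.sum_range_succ, ih, hamming_eq]
    push_cast
    ring

-- the table value at 2r-1 is the per-fold mismatch total
theorem diag_val (q : List String) (r : Nat) (hr1 : 1 ≤ r) (_hr2 : r < q.length) :
    (build_diag q).getD (2 * r - 1) 0 = (pairSum q r (min r (q.length - r)) : Int) := by
  unfold build_diag
  rw [diag_getD (fun i j => hamming (q.getD i "") (q.getD j "")) (List.range q.length)
      (List.replicate (2 * q.length) 0) (2 * r - 1)
      (fun j hj => by simp only [List.mem_range] at hj; rw [List.length_replicate]; omega)]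
  have h0 : (List.replicate (2 * q.length) (0 : Int)).getD (2 * r - 1) 0 = 0 := by
    by_cases h : 2 * r - 1 < 2 * q.length
    · rw [List.getD_eq_getElem _ 0 (by simpa using h), List.getElem_replicate]
    · rw [List.getD_eq_default _ 0 (by simpa using h)]
  rw [h0, zero_add, ← sum_hamming_cast q r (min r (q.length - r))]
  exact outer_sum_eq (fun i j => hamming (q.getD i "") (q.getD j "")) r hr1 q.length

-- A's part-1 slice comparison holds exactly when the pair sum is zero
theorem part1_iff (q : List String) (r : Nat) (h2 : r < q.length) :
    ((q.drop (r - min r (q.length - r))).take (min r (q.length - r))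
      = ((q.drop r).take (min r (q.length - r))).reverse)
    ↔ pairSum q r (min r (q.length - r)) = 0 := by
  have hmr : min r (q.length - r) ≤ r := min_le_left _ _
  have hmn : r + min r (q.length - r) ≤ q.length := by
    have := min_le_right r (q.length - r); omega
  rw [drop_take_eq_map_range q (r - min r (q.length - r)) _ (by omega),
    drop_take_rev_eq_map_range q r _ hmn,
    ← pairSum_reindex q r _ hmr,
    List.map_eq_map_iff, sum_map_eq_zero_iff]
  refine forall_congr' fun j => imp_congr_right fun hj => ?_
  exact (cmFull_eq_zero_iff.trans String.toList_inj).symm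

-- A's part-2 positional mismatch count over the joined strings is the pair sum
theorem part2_eq (q : List String) (L : Nat) (hL : ∀ row ∈ q, row.toList.length = L)
    (r : Nat) (h2 : r < q.length) :
    ((List.range ((((q.drop (r - min r (q.length - r))).take (min r (q.length - r))).map
          String.toList).flatten.length)).filter
      (fun i => (((q.drop (r - min r (q.length - r))).take (min r (q.length - r))).map
          String.toList).flatten.getD i ' '
        ≠ ((((q.drop r).take (min r (q.length - r))).reverse.map
          String.toList).flatten.getD i ' '))).length
    = pairSum q r (min r (q.length - r)) := by
  have hmr : min r (q.length - r) ≤ r := min_le_left _ _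
  have hmn : r + min r (q.length - r) ≤ q.length := by
    have := min_le_right r (q.length - r); omega
  rw [drop_take_eq_map_range q (r - min r (q.length - r)) _ (by omega),
    drop_take_rev_eq_map_range q r _ hmn, List.map_map, List.map_map]
  have hlen : ∀ j < min r (q.length - r),
      ((String.toList ∘ fun j => q.getD (r - min r (q.length - r) + j) "") j).length
      = ((String.toList ∘ fun j => q.getD (r + (min r (q.length - r) - 1 - j)) "") j).length := by
    intro j hj
    simp only [Function.comp_apply]
    rw [len_getD hL (by omega), len_getD hL (by omega)]
  have hflen := flatten_len_eq _ _ _ hlen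
  rw [range_count_eq_cm hflen, flatten_cm_range _ _ _ hlen]
  have hconv : ((List.range (min r (q.length - r))).map
      (fun j => cm ((String.toList ∘ fun j => q.getD (r - min r (q.length - r) + j) "") j)
        ((String.toList ∘ fun j => q.getD (r + (min r (q.length - r) - 1 - j)) "") j))).sum
      = ((List.range (min r (q.length - r))).map
      (fun j => cmFull (q.getD (r - min r (q.length - r) + j) "").toList
        (q.getD (r + (min r (q.length - r) - 1 - j)) "").toList)).sum := by
    apply congrArg
    apply List.map_congr_left
    intro j hj
    have hj' : j < min r (q.length - r) := List.mem_range.mp hj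
    have hl1 : (q.getD (r - min r (q.length - r) + j) "").toList.length = L :=
      len_getD hL (by omega)
    have hl2 : (q.getD (r + (min r (q.length - r) - 1 - j)) "").toList.length = L :=
      len_getD hL (by omega)
    simp only [Function.comp_apply]
    unfold cmFull
    omega
  rw [hconv, pairSum_reindex q r _ hmr]

-- the two search loops agree step by step
theorem loop_eq (q : List String) (L : Nat) (part : Int)
    (hL2 : part = 2 → ∀ row ∈ q, row.toList.length = L) :
    ∀ rs : List Nat, (∀ r ∈ rs, 1 ≤ r ∧ r < q.length) →
    grr_loop q part rs
      = fr_scan (build_diag q) (if part = 1 ∨ part = 2 then some (part - 1) else none) rs := by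
  intro rs
  induction rs with
  | nil => intro _; rfl
  | cons r rs ih =>
    intro hmem
    obtain ⟨hr1, hr2⟩ := hmem r (by simp)
    have hrec := ih (fun x hx => hmem x (by simp [hx]))
    have hdv := diag_val q r hr1 hr2
    have hp1 := part1_iff q r hr2
    show
      (if part = 1 ∧ (q.drop (r - min r (q.length - r))).take (min r (q.length - r))
            = ((q.drop r).take (min r (q.length - r))).reverse then (r : Int)
        else if part = 2 ∧
            ((List.range ((((q.drop (r - min r (q.length - r))).take (min r (q.length - r))).map
                String.toList).flatten.length)).filter
              (fun i => (((q.drop (r - min r (q.length - r))).take (min r (q.length - r))).map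
                  String.toList).flatten.getD i ' '
                ≠ ((((q.drop r).take (min r (q.length - r))).reverse.map
                  String.toList).flatten.getD i ' '))).length = 1 then (r : Int)
        else grr_loop q part rs)
      = (if some ((build_diag q).getD (2 * r - 1) 0)
            = (if part = 1 ∨ part = 2 then some (part - 1) else none) then (r : Int)
        else fr_scan (build_diag q) (if part = 1 ∨ part = 2 then some (part - 1) else none) rs)
    rw [hdv]
    by_cases h1 : part = 1
    · subst h1
      have hd : (if (1 : Int) = 1 ∨ (1 : Int) = 2 then some ((1 : Int) - 1) else none)
          = some 0 := by norm_num
      rw [hd] at hrec ⊢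
      by_cases hps : pairSum q r (min r (q.length - r)) = 0
      · rw [if_pos ⟨rfl, hp1.mpr hps⟩, if_pos (by rw [hps]; norm_num)]
      · rw [if_neg (fun hc => hps (hp1.mp hc.2)),
          if_neg (by norm_num),
          if_neg (by simpa using hps)]
        exact hrec
    · by_cases h2 : part = 2
      · subst h2
        have hp2 := part2_eq q L (hL2 rfl) r hr2
        rw [hp2]
        have hd : (if (2 : Int) = 1 ∨ (2 : Int) = 2 then some ((2 : Int) - 1) else none)
            = some 1 := by norm_num
        rw [hd] at hrec ⊢
        rw [if_neg (fun hc => h1 hc.1)]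
        by_cases hps : pairSum q r (min r (q.length - r)) = 1
        · rw [if_pos ⟨rfl, hps⟩, if_pos (by rw [hps]; norm_num)]
        · rw [if_neg (fun hc => hps hc.2), if_neg (by simpa using hps)]
          exact hrec
      · have hd : (if part = 1 ∨ part = 2 then some (part - 1) else none) = none := by
          simp [h1, h2]
        rw [hd] at hrec ⊢
        rw [if_neg (fun hc => h1 hc.1), if_neg (fun hc => h2 hc.1), if_neg (by simp)]
        exact hrec

theorem get_eq_find (q : List String) (L : Nat) (part : Int)
    (hL2 : part = 2 → ∀ row ∈ q, row.toList.length = L) : get_reflection_row q part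
      = find_reflection q (if part = 1 ∨ part = 2 then some (part - 1) else none) := by
  unfold get_reflection_row find_reflection
  apply loop_eq q L part hL2
  intro r hr
  have := List.mem_range'_1.mp hr
  omega

theorem transpose_rect (p : List String) :
    ∀ row ∈ transpose_pattern p, row.toList.length = p.length := by
  intro row hrow
  unfold transpose_pattern at hrow
  simp only [List.mem_map, List.mem_range] at hrow
  obtain ⟨y, _, rfl⟩ := hrow
  simp

theorem zip_cols_eq (p : List String) : zip_cols p = transpose_pattern p := rfl

-- ===== VERDICT (by name: the statement is the Claim_ definition above) =====
theorem solution_spec : Claim_equal_solution := by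
  unfold Claim_equal_solution
  intro patterns part _ hpre
  unfold Spec_solution
  show solution patterns part = solution_alt patterns part
  unfold solution solution_alt
  have main : ∀ (l : List (List String)),
      (∀ p ∈ l, p ≠ [] ∧ (∀ row ∈ p, (p.headD "").toList.length ≤ row.toList.length)
        ∧ (part = 2 → 2 ≤ p.length → ∀ row ∈ p, row.toList.length = (p.headD "").toList.length)) →
      ∀ s : Int,
      l.foldl (fun summary pattern =>
        let r := get_reflection_row (transpose_pattern pattern) part
        if r > 0 then summary + r
        else summary + (get_reflection_row pattern part) * 100) s
      = l.foldl (fun total pattern =>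
        let r := find_reflection (zip_cols pattern)
          (if part = 1 ∨ part = 2 then some (part - 1) else none)
        total + (if r > 0 then r
          else 100 * find_reflection pattern
            (if part = 1 ∨ part = 2 then some (part - 1) else none))) s := by
    intro l
    induction l with
    | nil => intro _ _; rfl
    | cons p l ih =>
      intro hl s
      obtain ⟨_hne, _hge, hrect2⟩ := hl p (by simp)
      have e1 : get_reflection_row (transpose_pattern p) part
          = find_reflection (zip_cols p)
            (if part = 1 ∨ part = 2 then some (part - 1) else none) := by
        rw [zip_cols_eq p]
        exact get_eq_find (transpose_pattern p) p.length part (fun _ => transpose_rect p)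
      have e2 : get_reflection_row p part
          = find_reflection p (if part = 1 ∨ part = 2 then some (part - 1) else none) := by
        by_cases hlen : 2 ≤ p.length
        · exact get_eq_find p ((p.headD "").toList.length) part (fun h2 => hrect2 h2 hlen)
        · have h0 : p.length - 1 = 0 := by omega
          unfold get_reflection_row find_reflection
          rw [h0]
          rfl
      simp only [List.foldl_cons]
      rw [ih (fun x hx => hl x (by simp [hx]))]
      apply congrArg (fun z => List.foldl _ z l)
      simp only [e1, e2]
      by_cases hr : find_reflection (zip_cols p)
          (if part = 1 ∨ part = 2 then some (part - 1) else none) > 0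
      · simp [hr]
      · simp [hr]
        ring
  exact main patterns hpre 0
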